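-- pv_equiv track=rewrite | github.com/primetime00/memory_hack | app/scripts/pscan_lin.py | generate_result_order
-- ===== SOURCE A (Python) =====
-- def generate_result_order(results):
--     v = list(range(0, len(results)))
--     g = []
--     state = 0
--     sz = len(v)
--     index = 0
--     end_index = len(v) - 1
--     while len(g) != sz:
--         if state == 0:
--             g.append(v[0])
--             state = 1
--             v.pop(0)
--             index += 1
--         elif state == 1:
--             g.append(v[-1])
--             state = 2
--             v.pop(len(v) - 1)
--             end_index -= 1
--         elif state == 2:
--             center = int((len(v) - 1) / 2)
--             g.append(v[center])
--             v.pop(center)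
--             state = 0
--     return g
-- ===== SOURCE B (Python) =====
-- from collections import deque
--
--
-- def generate_result_order(results):
--     n = len(results)
--     # remaining indices kept as two balanced deques: left = first ceil(m/2), right = rest
--     left = deque(range(0, (n + 1) // 2))
--     right = deque(range((n + 1) // 2, n))
--     g = []
--
--     def rebalance():
--         total = len(left) + len(right)
--         want = (total + 1) // 2
--         while len(left) > want:
--             right.appendleft(left.pop())
--         while len(left) < want:
--             left.append(right.popleft())
--
--     while left or right:
--         g.append(left.popleft())          # front of remaining
--         rebalance()
--         if left or right:
--             g.append(right.pop() if right else left.pop())   # back of remaining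
--             rebalance()
--         if left or right:
--             g.append(left.pop())          # center: index (m-1)//2 == len(left)-1
--             rebalance()
--     return g
-- ===== Notes on version B (the rewrite author's own statement) =====
-- stated objective: faster
-- what changed: Replaces the state-machine loop over one Python list (with O(n) pop(0)/pop(center) shifts) by a per-round loop over two balanced deques where front, back and center removals are all O(1) amortized.
import Mathlib
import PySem

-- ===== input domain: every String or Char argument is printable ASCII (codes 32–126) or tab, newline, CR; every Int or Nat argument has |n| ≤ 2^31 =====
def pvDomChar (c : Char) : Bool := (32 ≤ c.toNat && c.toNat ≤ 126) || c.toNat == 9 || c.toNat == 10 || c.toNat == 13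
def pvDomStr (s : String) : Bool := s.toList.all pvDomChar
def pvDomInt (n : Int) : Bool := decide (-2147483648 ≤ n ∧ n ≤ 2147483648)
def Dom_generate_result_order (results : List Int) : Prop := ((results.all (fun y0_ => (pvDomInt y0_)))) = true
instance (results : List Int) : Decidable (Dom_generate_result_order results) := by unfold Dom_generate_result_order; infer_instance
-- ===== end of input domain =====

-- B replaces A's single list with O(n) pop(0)/pop(center) shifts by two balanced deques
-- (front, back and center removals all O(1) amortized): objective 'faster' (asymptotic).

-- ===== PORT A =====
-- while loop ported with fuel = len(v) (one fuel per iteration; each iteration moves exactly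
-- one element from v to g, so the fuel is never exhausted before the loop condition ends it).
def loopA (fuel : Nat) (g v : List Int) (state sz index end_index : Int) : List Int :=
  match fuel with
  | 0 => g
  | Nat.succ fuel' =>
    if (g.length : Int) = sz then g
    else if state = 0 then
      match v with
      | [] => g  -- unreachable from the entry call (Python's v[0] would raise IndexError)
      | x :: t => loopA fuel' (g ++ [x]) t 1 sz (index + 1) end_index
    else if state = 1 then
      match v with
      | [] => g  -- unreachable (Python's v[-1] would raise IndexError)
      | x :: t => loopA fuel' (g ++ [(x :: t).getLast (by simp)]) ((x :: t).dropLast) 2 sz index (end_index - 1)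
    else if state = 2 then
      -- int((len(v)-1)/2): exact for nonempty v (the only reachable case): trunc = floor on ≥ 0
      let center : Nat := (v.length - 1) / 2
      loopA fuel' (g ++ [v.getD center 0]) (v.eraseIdx center) 0 sz index end_index
    else g  -- unreachable: state cycles 0 → 1 → 2

def generate_result_order (results : List Int) : List Int :=
  let v := PySem.List.pyRange 0 (results.length : Int) 1
  loopA v.length [] v 0 (v.length : Int) 0 ((v.length : Int) - 1)

-- ===== PORT B =====
-- deques become Lists: popleft = head/tail, pop = getLast/dropLast, appendleft = cons, append = ++ [·]
-- 'while len(left) > want: right.appendleft(left.pop())'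
def moveL (left right : List Int) (want : Nat) : List Int × List Int :=
  if h : want < left.length then
    moveL left.dropLast (left.getLast (List.ne_nil_of_length_pos (by omega)) :: right) want
  else (left, right)
termination_by left.length
decreasing_by simp [List.length_dropLast]; omega

-- 'while len(left) < want: left.append(right.popleft())'
def moveR (left right : List Int) (want : Nat) : List Int × List Int :=
  if left.length < want then
    match right with
    | [] => (left, right)  -- unreachable under the balance invariant (Python's popleft would raise)
    | y :: rt => moveR (left ++ [y]) rt want
  else (left, right)
termination_by right.length

def rebalance (left right : List Int) : List Int × List Int :=
  let want := (left.length + right.length + 1) / 2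
  let p := moveL left right want
  moveR p.1 p.2 want

-- the while loop, fuel = n (one fuel per round; each round removes 1–3 elements)
def loopB (fuel : Nat) (g left right : List Int) : List Int :=
  match fuel with
  | 0 => g
  | Nat.succ fuel' =>
    if left.isEmpty && right.isEmpty then g
    else
      match left with
      | [] => g  -- unreachable under the balance invariant (Python's popleft would raise)
      | x :: lt =>
        let g1 := g ++ [x]                                   -- g.append(left.popleft())
        let p1 := rebalance lt right
        if p1.1.isEmpty && p1.2.isEmpty then g1
        else
          let step2 : Int × List Int × List Int :=           -- right.pop() if right else left.pop()
            match p1.2.getLast?, p1.1.getLast? with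
            | some y, _ => (y, p1.1, p1.2.dropLast)
            | none, some z => (z, p1.1.dropLast, p1.2)
            | none, none => (0, p1.1, p1.2)                  -- unreachable: not both empty here
          let g2 := g1 ++ [step2.1]
          let p2 := rebalance step2.2.1 step2.2.2
          if p2.1.isEmpty && p2.2.isEmpty then g2
          else
            let g3 := g2 ++ [p2.1.getLast?.getD 0]           -- g.append(left.pop()); left nonempty under invariant
            let p3 := rebalance p2.1.dropLast p2.2
            loopB fuel' g3 p3.1 p3.2

def generate_result_order_alt (results : List Int) : List Int :=
  let n : Int := (results.length : Int)
  let h : Int := PySem.Int.floordiv (n + 1) 2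
  let left := PySem.List.pyRange 0 h 1
  let right := PySem.List.pyRange h n 1
  loopB results.length [] left right

-- ===== PRECONDITION & SPEC =====
def Spec_generate_result_order (results : List Int) (out : List Int) : Prop := out = generate_result_order_alt results
instance (results : List Int) (out : List Int) : Decidable (Spec_generate_result_order results out) := by unfold Spec_generate_result_order; infer_instance

-- ===== CLAIM (what is proved, stated in full; the proofs are below) =====
def Claim_equal_generate_result_order : Prop := ∀ (results : List Int), Dom_generate_result_order results → Spec_generate_result_order results (generate_result_order results)

-- ===== LEMMAS AND PROOFS =====

theorem moveL_join (l r : List Int) (w : Nat) : (moveL l r w).1 ++ (moveL l r w).2 = l ++ r := by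
  fun_induction moveL l r w with
  | case1 l r h ih =>
    rw [ih]
    have hne : l ≠ [] := List.ne_nil_of_length_pos (by omega)
    calc l.dropLast ++ l.getLast hne :: r = (l.dropLast ++ [l.getLast hne]) ++ r := by simp
      _ = l ++ r := by rw [List.dropLast_append_getLast]
  | case2 => rfl

theorem moveL_len (l r : List Int) (w : Nat) : (moveL l r w).1.length = min l.length w := by
  fun_induction moveL l r w with
  | case1 l r h ih => rw [ih]; simp only [List.length_dropLast]; omega
  | case2 l r h => simp only; omega

theorem moveR_join (l r : List Int) (w : Nat) : (moveR l r w).1 ++ (moveR l r w).2 = l ++ r := by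
  fun_induction moveR l r w with
  | case1 => simp
  | case2 l h y rt ih => rw [ih]; simp
  | case3 => rfl

theorem moveR_len (l r : List Int) (w : Nat) (h1 : l.length ≤ w) (h2 : w ≤ l.length + r.length) :
    (moveR l r w).1.length = w := by
  fun_induction moveR l r w with
  | case1 l h => simp at h2; omega
  | case2 l h y rt ih => simp at h2; apply ih <;> simp <;> omega
  | case3 l r h => simp; omega

theorem rebalance_join (l r : List Int) : (rebalance l r).1 ++ (rebalance l r).2 = l ++ r := by
  simp only [rebalance]
  rw [moveR_join, moveL_join]

theorem rebalance_len (l r : List Int) :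
    (rebalance l r).1.length = (l.length + r.length + 1) / 2 := by
  simp only [rebalance]
  have hj := moveL_join l r ((l.length + r.length + 1) / 2)
  have hlen : (moveL l r ((l.length + r.length + 1) / 2)).1.length
      + (moveL l r ((l.length + r.length + 1) / 2)).2.length = l.length + r.length := by
    have := congrArg List.length hj; simpa using this
  rw [moveR_len]
  · rw [moveL_len]; omega
  · omega

theorem loopA_stop (fa : Nat) (g v : List Int) (st sz i e : Int) (h : (g.length : Int) = sz) :
    loopA fa g v st sz i e = g := by
  cases fa <;> simp [loopA, h]

theorem loopB_emp (fb : Nat) (g : List Int) : loopB fb g [] [] = g := by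
  cases fb <;> simp [loopB]

theorem loopA_step0 (fa : Nat) (g : List Int) (x : Int) (t : List Int) (sz i e : Int)
    (h : ¬((g.length : Int) = sz)) :
    loopA (fa+1) g (x :: t) 0 sz i e = loopA fa (g ++ [x]) t 1 sz (i+1) e := by
  simp [loopA, h]

theorem loopA_step1 (fa : Nat) (g : List Int) (x : Int) (t : List Int) (sz i e : Int)
    (h : ¬((g.length : Int) = sz)) :
    loopA (fa+1) g (x :: t) 1 sz i e
      = loopA fa (g ++ [(x :: t).getLast (by simp)]) ((x :: t).dropLast) 2 sz i (e-1) := by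
  simp [loopA, h]

theorem loopA_step2 (fa : Nat) (g v : List Int) (sz i e : Int)
    (h : ¬((g.length : Int) = sz)) :
    loopA (fa+1) g v 2 sz i e
      = loopA fa (g ++ [v.getD ((v.length-1)/2) 0]) (v.eraseIdx ((v.length-1)/2)) 0 sz i e := by
  simp [loopA, h]

-- the main invariant lemma: A's pop-from-one-list loop equals B's two-deque loop
theorem main_lemma : ∀ (m fa fb : Nat) (g l r : List Int) (sz i e : Int),
    l.length + r.length ≤ m → m ≤ fa → m ≤ fb →
    l.length = (l.length + r.length + 1) / 2 →
    (g.length : Int) + ((l.length + r.length : Nat) : Int) = sz →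
    loopA fa g (l ++ r) 0 sz i e = loopB fb g l r := by
  intro m
  induction m using Nat.strong_induction_on with
  | _ m IH =>
  intro fa fb g l r sz i e hm hfa hfb hbal hsz
  cases l with
  | nil =>
    have hr : r = [] := by
      simp at hbal
      exact List.eq_nil_of_length_eq_zero (by omega)
    subst hr
    simp only [List.nil_append]
    rw [loopB_emp, loopA_stop]
    simp at hsz
    omega
  | cons x lt =>
    simp only [List.length_cons] at hm hbal hsz
    have hg : ¬((g.length : Int) = sz) := by push_cast at hsz; omega
    obtain ⟨fa', rfl⟩ : ∃ k, fa = k + 1 := ⟨fa - 1, by omega⟩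
    obtain ⟨fb', rfl⟩ : ∃ k, fb = k + 1 := ⟨fb - 1, by omega⟩
    rw [List.cons_append, loopA_step0 _ _ _ _ _ _ _ hg]
    conv_rhs => rw [loopB]
    simp only [List.isEmpty_cons, Bool.false_and, Bool.false_eq_true, if_false]
    have hj1 := rebalance_join lt r
    have hl1 := rebalance_len lt r
    -- shared continuation: from the state-2 configuration onwards the two loops agree
    have contA : ∀ (fa2 : Nat) (g2 l2 r2 : List Int) (i2 e2 : Int),
        l2.length + r2.length + 2 ≤ m →
        m ≤ fa2 + 2 →
        ((g2.length : Int) + ((l2.length + r2.length : Nat) : Int) = sz) →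
        loopA fa2 g2 (l2 ++ r2) 2 sz i2 e2 =
          (if ((rebalance l2 r2).1.isEmpty && (rebalance l2 r2).2.isEmpty) = true then g2
           else loopB fb' (g2 ++ [(rebalance l2 r2).1.getLast?.getD 0])
                  (rebalance (rebalance l2 r2).1.dropLast (rebalance l2 r2).2).1
                  (rebalance (rebalance l2 r2).1.dropLast (rebalance l2 r2).2).2) := by
      intro fa2 g2 l2 r2 i2 e2 hc1 hc2 hc3
      have hj2 := rebalance_join l2 r2
      have hl2 := rebalance_len l2 r2
      have hlenj := congrArg List.length hj2
      simp only [List.length_append] at hlenj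
      by_cases hz : l2.length + r2.length = 0
      · have hq1 : (rebalance l2 r2).1 = [] := List.eq_nil_of_length_eq_zero (by omega)
        have hq2 : (rebalance l2 r2).2 = [] := List.eq_nil_of_length_eq_zero (by omega)
        rw [hq1, hq2, loopA_stop _ _ _ _ _ _ _ (by push_cast at hc3; omega)]
        simp
      · have hq1ne : (rebalance l2 r2).1 ≠ [] := by
          intro hh
          rw [hh] at hl2
          simp at hl2
          omega
        rw [if_neg (by simp [List.isEmpty_iff, hq1ne])]
        obtain ⟨fa3, rfl⟩ : ∃ k, fa2 = k + 1 := ⟨fa2 - 1, by omega⟩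
        have hgg : ¬((g2.length : Int) = sz) := by push_cast at hc3; omega
        rw [loopA_step2 _ _ _ _ _ _ hgg]
        have hq1pos : 0 < (rebalance l2 r2).1.length := List.length_pos_of_ne_nil hq1ne
        have hcix : ((l2 ++ r2).length - 1) / 2 = (rebalance l2 r2).1.length - 1 := by
          simp only [List.length_append]
          omega
        rw [hcix, ← hj2]
        have hlt1 : (rebalance l2 r2).1.length - 1 < (rebalance l2 r2).1.length := by omega
        have hgetD : ((rebalance l2 r2).1 ++ (rebalance l2 r2).2).getD ((rebalance l2 r2).1.length - 1) 0
            = (rebalance l2 r2).1.getLast hq1ne := by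
          rw [List.getD_eq_getElem _ _ (by simp; omega)]
          rw [List.getElem_append_left hlt1, List.getLast_eq_getElem]
        have herase : ((rebalance l2 r2).1 ++ (rebalance l2 r2).2).eraseIdx ((rebalance l2 r2).1.length - 1)
            = (rebalance l2 r2).1.dropLast ++ (rebalance l2 r2).2 := by
          rw [List.eraseIdx_append_of_lt_length hlt1]
          congr 1
          exact (List.dropLast_eq_eraseIdx (by omega)).symm
        rw [hgetD, herase]
        rw [List.getLast?_eq_getLast_of_ne_nil hq1ne]
        simp only [Option.getD_some]
        have hj3 := rebalance_join (rebalance l2 r2).1.dropLast (rebalance l2 r2).2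
        have hlenj3 := congrArg List.length hj3
        simp only [List.length_append, List.length_dropLast] at hlenj3
        rw [← hj3]
        apply IH (m - 3) (by omega) fa3 fb' _ _ _ sz i2 e2
        · omega
        · omega
        · omega
        · have := rebalance_len (rebalance l2 r2).1.dropLast (rebalance l2 r2).2
          simp only [List.length_dropLast] at this
          omega
        · push_cast at hc3 ⊢
          simp only [List.length_append, List.length_cons, List.length_nil]
          push_cast
          omega
    by_cases h1 : lt.length + r.length = 0
    · -- the front pop emptied the list: both loops stop
      have hlt0 : lt = [] := List.eq_nil_of_length_eq_zero (by omega)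
      have hr0 : r = [] := List.eq_nil_of_length_eq_zero (by omega)
      subst hlt0; subst hr0
      have hlenj := congrArg List.length hj1
      simp only [List.length_append, List.length_nil] at hlenj
      have hq1 : (rebalance ([] : List Int) ([] : List Int)).1 = [] := List.eq_nil_of_length_eq_zero (by omega)
      have hq2 : (rebalance ([] : List Int) ([] : List Int)).2 = [] := List.eq_nil_of_length_eq_zero (by omega)
      rw [hq1, hq2, loopA_stop _ _ _ _ _ _ _ (by simp; push_cast at hsz; omega)]
      simp
    · -- at least two elements remain: back pop happens
      have hq1ne : (rebalance lt r).1 ≠ [] := by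
        intro hh
        rw [hh] at hl1
        simp at hl1
        omega
      rw [if_neg (by simp [List.isEmpty_iff, hq1ne])]
      obtain ⟨fa'', rfl⟩ : ∃ k, fa' = k + 1 := ⟨fa' - 1, by omega⟩
      have hg1 : ¬(((g ++ [x]).length : Int) = sz) := by
        simp only [List.length_append, List.length_cons, List.length_nil]
        push_cast at hsz ⊢
        omega
      cases hv1 : lt ++ r with
      | nil => exact absurd (congrArg List.length hv1) (by simp only [List.length_append, List.length_nil]; omega)
      | cons y t =>
      rw [loopA_step1 _ _ _ _ _ _ _ hg1]
      by_cases hr1 : (rebalance lt r).2 = []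
      · -- back pop comes from the left deque (right deque empty: one element left)
        have hp1v : (rebalance lt r).1 = y :: t := by rw [← hv1, ← List.append_nil (rebalance lt r).1, ← hr1, hj1]
        rw [hr1, hp1v]
        simp only [List.getLast?_nil, List.getLast?_eq_getLast_of_ne_nil (List.cons_ne_nil y t)]
        conv_lhs => rw [← List.append_nil ((y :: t).dropLast)]
        refine contA fa'' _ _ _ (i+1) (e-1) ?_ (by omega) ?_
        · have := congrArg List.length hv1
          simp only [List.length_append, List.length_cons, List.length_nil, List.length_dropLast] at this ⊢
          omega
        · have := congrArg List.length hv1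
          simp only [List.length_append, List.length_cons, List.length_nil, List.length_dropLast] at this ⊢
          push_cast at hsz ⊢
          omega
      · -- back pop comes from the right deque
        have hyt : y :: t = (rebalance lt r).1 ++ (rebalance lt r).2 := by rw [hj1, hv1]
        have hgl : (y :: t).getLast (by simp) = (rebalance lt r).2.getLast hr1 := by
          have ha : (y :: t).getLast? = some ((y :: t).getLast (by simp)) :=
            List.getLast?_eq_getLast_of_ne_nil _
          have hb : (y :: t).getLast? = some ((rebalance lt r).2.getLast hr1) := by
            rw [hyt, List.getLast?_append, List.getLast?_eq_getLast_of_ne_nil hr1]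
            simp
          exact Option.some.inj (ha.symm.trans hb)
        have hdl : (y :: t).dropLast = (rebalance lt r).1 ++ (rebalance lt r).2.dropLast := by
          rw [hyt, List.dropLast_append_of_ne_nil hr1]
        rw [List.getLast?_eq_getLast_of_ne_nil hr1]
        rw [hgl, hdl]
        refine contA fa'' _ _ _ (i+1) (e-1) ?_ (by omega) ?_
        · have := congrArg List.length hv1
          have hlenj := congrArg List.length hj1
          have hq2pos := List.length_pos_of_ne_nil hr1
          simp only [List.length_append, List.length_cons, List.length_dropLast] at this hlenj ⊢
          omega
        · have := congrArg List.length hv1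
          have hlenj := congrArg List.length hj1
          have hq2pos := List.length_pos_of_ne_nil hr1
          simp only [List.length_append, List.length_cons, List.length_nil, List.length_dropLast] at this hlenj ⊢
          push_cast at hsz ⊢
          omega

theorem generate_result_order_spec : Claim_equal_generate_result_order := by
  unfold Claim_equal_generate_result_order Spec_generate_result_order
  intro results _
  simp only [generate_result_order, generate_result_order_alt]
  have hlen : (PySem.List.pyRange 0 (results.length : Int) 1).length = results.length := by
    rw [PySem.List.length_pyRange_one]; omega
  have hmid : PySem.Int.floordiv ((results.length : Int) + 1) 2 = (((results.length + 1) / 2 : Nat) : Int) := by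
    rw [PySem.Int.floordiv_eq_ediv_of_pos (by norm_num)]
    omega
  have hsplit := PySem.List.pyRange_one_append 0 (((results.length + 1) / 2 : Nat) : Int)
    (results.length : Int) (by positivity) (by omega)
  have hL : (PySem.List.pyRange 0 (((results.length + 1) / 2 : Nat) : Int) 1).length
      = (results.length + 1) / 2 := by
    rw [PySem.List.length_pyRange_one]; omega
  have hR : (PySem.List.pyRange (((results.length + 1) / 2 : Nat) : Int) (results.length : Int) 1).length
      = results.length - (results.length + 1) / 2 := by
    rw [PySem.List.length_pyRange_one]; omega
  rw [hmid, hlen, hsplit]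
  refine main_lemma results.length _ _ _ _ _ _ _ _ ?_ ?_ ?_ ?_ ?_
  · rw [hL, hR]; omega
  · omega
  · omega
  · rw [hL, hR]; omega
  · rw [hL, hR]; simp; omega
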